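-- pv_equiv track=rewrite | github.com/svend4/meta | projects/hexdim/hexdim.py | subcube
-- ===== SOURCE A (Python) =====
-- def subcube(free_axes, base=0):
--     """
--     Подкуб Qₖ с k = len(free_axes) свободными осями.
--
--     free_axes: подмножество {0,1,2,3,4,5} — индексы свободных битов.
--     base: 6-битное число, значения фиксированных битов.
--     Возвращает frozenset из 2^k вершин.
--     """
--     free_axes = list(free_axes)
--     k = len(free_axes)
--     # Зафиксировать фиксированные биты из base, перебрать свободные
--     fixed_mask = ((1 << 6) - 1) ^ sum(1 << a for a in free_axes)
--     fixed_val = base & fixed_mask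
--     vertices = set()
--     for bits in range(1 << k):
--         h = fixed_val
--         for idx, axis in enumerate(free_axes):
--             if (bits >> idx) & 1:
--                 h |= (1 << axis)
--         vertices.add(h)
--     return frozenset(vertices)
-- ===== SOURCE B (Python) =====
-- def subcube(free_axes, base=0):
--     """Same vertices, built by incremental doubling over the free axes
--     instead of enumerating all 2^k bit patterns."""
--     free_axes = list(free_axes)
--     fixed_val = base & (63 ^ sum(1 << a for a in free_axes))
--     vertices = {fixed_val}
--     for axis in free_axes:
--         m = 1 << axis
--         vertices |= {v | m for v in vertices}
--     return frozenset(vertices)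
-- ===== Notes on version B (the rewrite author's own statement) =====
-- stated objective: faster
-- what changed: Replaces the enumeration of all 2^k bit patterns (with an inner per-axis loop rebuilding each vertex from scratch) by incremental doubling: start from the fixed value and, for each free axis, union the set with its copy shifted by that axis bit.
import Mathlib
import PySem

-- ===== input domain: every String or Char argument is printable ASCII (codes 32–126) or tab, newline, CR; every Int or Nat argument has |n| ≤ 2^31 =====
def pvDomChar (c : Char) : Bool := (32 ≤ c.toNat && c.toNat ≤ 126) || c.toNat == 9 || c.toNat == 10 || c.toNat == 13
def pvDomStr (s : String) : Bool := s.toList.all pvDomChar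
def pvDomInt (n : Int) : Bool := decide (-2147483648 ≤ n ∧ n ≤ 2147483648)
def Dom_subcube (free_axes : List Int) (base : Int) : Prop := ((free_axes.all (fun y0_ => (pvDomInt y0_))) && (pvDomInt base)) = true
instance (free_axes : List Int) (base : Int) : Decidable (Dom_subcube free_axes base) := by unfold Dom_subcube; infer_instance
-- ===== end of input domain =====

-- B builds the vertex set by incremental doubling over the free axes instead of
-- enumerating all 2^k bit patterns with an inner per-axis loop (faster).


-- ===== PORT A =====
-- '1 << a' is ported as '(1 : Int) <<< a.toNat' — exact for 0 ≤ a (Pre_subcube; Python raises ValueError for a < 0)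
def subcube (free_axes : List Int) (base : Int) : List Int :=
  let fa := free_axes
  let k := fa.length
  let fixed_mask := PySem.Int.bxor (((1 : Int) <<< (6 : Nat)) - 1) ((fa.map (fun a => (1 : Int) <<< a.toNat)).sum)
  let fixed_val := PySem.Int.band base fixed_mask
  (PySem.List.pyRange 0 ((1 : Int) <<< k) 1).foldl
    (fun (s : PySem.Set Int) bits =>
      let h := (PySem.List.enumerate fa 0).foldl
        (fun h p => if PySem.Int.band (bits >>> p.1.toNat) 1 ≠ 0
                    then PySem.Int.bor h ((1 : Int) <<< p.2.toNat) else h) fixed_val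
      PySem.Set.add s h)
    (PySem.Set.empty : PySem.Set Int)

-- ===== PORT B =====
def subcube_alt (free_axes : List Int) (base : Int) : List Int :=
  let fixed_val := PySem.Int.band base (PySem.Int.bxor 63 ((free_axes.map (fun a => (1 : Int) <<< a.toNat)).sum))
  free_axes.foldl
    (fun (vertices : PySem.Set Int) axis =>
      let m := (1 : Int) <<< axis.toNat
      PySem.Set.union vertices (PySem.Set.ofList (vertices.map (fun v => PySem.Int.bor v m))))
    (PySem.Set.ofList [fixed_val])

-- ===== PRECONDITION & SPEC =====
-- Pre_ excludes negative axes, on which Python's '1 << a' raises ValueError.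
def Pre_subcube (free_axes : List Int) (base : Int) : Prop := ∀ a ∈ free_axes, 0 ≤ a
instance (free_axes : List Int) (base : Int) : Decidable (Pre_subcube free_axes base) := by unfold Pre_subcube; infer_instance
def pvWitness_subcube : List Int × Int := ([0, 2, 5], 11)

def Spec_subcube (free_axes : List Int) (base : Int) (out : List Int) : Prop := out = subcube_alt free_axes base
instance (free_axes : List Int) (base : Int) (out : List Int) : Decidable (Spec_subcube free_axes base out) := by unfold Spec_subcube; infer_instance

-- ===== CLAIM (what is proved, stated in full; the proofs are below) =====
def Claim_equal_subcube : Prop := ∀ (free_axes : List Int) (base : Int), Dom_subcube free_axes base → Pre_subcube free_axes base → Spec_subcube free_axes base (subcube free_axes base)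

-- ===== LEMMAS AND PROOFS =====

-- A's inner loop body and the vertex value it computes for a given bit pattern
def hvStep (bits h : Int) (p : Int × Int) : Int :=
  if PySem.Int.band (bits >>> p.1.toNat) 1 ≠ 0 then PySem.Int.bor h ((1 : Int) <<< p.2.toNat) else h

def hv (l : List Int) (fv bits : Int) : Int := (PySem.List.enumerate l 0).foldl (hvStep bits) fv

-- first-occurrence dedup relative to an accumulator of already-seen values
def ddAux (seen : List Int) : List Int → List Int
  | [] => []
  | x :: xs => if x ∈ seen then ddAux seen xs else x :: ddAux (x :: seen) xs

theorem ddAux_congr (V : List Int) (s1 s2 : List Int) (h : ∀ y, y ∈ s1 ↔ y ∈ s2) :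
    ddAux s1 V = ddAux s2 V := by
  induction V generalizing s1 s2 with
  | nil => rfl
  | cons x xs ih =>
    simp only [ddAux, h x]
    split_ifs with hx
    · exact ih s1 s2 h
    · exact congrArg _ (ih (x :: s1) (x :: s2) (by intro y; simp [h y]))

theorem foldl_add_eq_append_ddAux (V : List Int) (s : PySem.Set Int) :
    V.foldl PySem.Set.add s = s ++ ddAux s V := by
  induction V generalizing s with
  | nil => simp [ddAux]
  | cons x xs ih =>
    by_cases hx : x ∈ s
    · simp only [List.foldl_cons, PySem.Set.add_of_mem hx, ddAux, if_pos hx, ih]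
    · simp only [List.foldl_cons, PySem.Set.add_of_not_mem hx, ddAux, if_neg hx, ih]
      rw [ddAux_congr xs (s ++ [x]) (x :: s) (by intro y; simp [or_comm])]
      simp

theorem update_map_ddAux (V : List Int) (f : Int → Int) :
    ∀ (seen : List Int) (s : PySem.Set Int), (∀ x ∈ seen, f x ∈ s) →
      PySem.Set.update s (V.map f) = PySem.Set.update s ((ddAux seen V).map f) := by
  induction V with
  | nil => intro _ _ _; rfl
  | cons x xs ih =>
    intro seen s hs
    by_cases hx : x ∈ seen
    · simp only [List.map_cons, PySem.Set.update_cons, ddAux, if_pos hx,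
        PySem.Set.add_of_mem (hs x hx)]
      exact ih seen s hs
    · simp only [List.map_cons, PySem.Set.update_cons, ddAux, if_neg hx]
      refine ih (x :: seen) (PySem.Set.add s (f x)) ?_
      intro y hy
      rcases List.mem_cons.mp hy with h | h
      · subst h; simp [PySem.Set.mem_add]
      · simp [PySem.Set.mem_add, hs y h]

-- the KEY dedup fact: appending the f-image of the raw value list is the same as
-- appending the f-image of its deduplicated (set) form
theorem update_map_ofList (V : List Int) (f : Int → Int) :
    PySem.Set.update (PySem.Set.ofList V) (V.map f)
      = PySem.Set.update (PySem.Set.ofList V) ((PySem.Set.ofList V).map f) := by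
  have h0 : PySem.Set.ofList V = ddAux [] V := by
    have := foldl_add_eq_append_ddAux V ([] : PySem.Set Int)
    simpa [PySem.Set.ofList_eq_foldl] using this
  rw [update_map_ddAux V f [] (PySem.Set.ofList V) (by simp), ← h0]

theorem update_ofList_right (s : PySem.Set Int) (zs : List Int) :
    PySem.Set.update s (PySem.Set.ofList zs) = PySem.Set.update s zs := by
  rw [PySem.Set.update_eq_append_filter, PySem.Set.update_eq_append_filter,
    PySem.Set.ofList_ofList]

theorem hv_append (l : List Int) (a : Int) (fv b : Int) :
    hv (l ++ [a]) fv b = hvStep b (hv l fv b) ((l.length : Int), a) := by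
  unfold hv
  rw [PySem.List.enumerate_append, List.foldl_append]
  simp [PySem.List.enumerate_cons, PySem.List.enumerate_nil]

theorem hv_congr (l : List Int) (fv b1 b2 : Int)
    (h : ∀ j : Nat, j < l.length → PySem.Int.band (b1 >>> j) 1 = PySem.Int.band (b2 >>> j) 1) :
    hv l fv b1 = hv l fv b2 := by
  induction l using List.reverseRecOn with
  | nil => rfl
  | append_singleton l a ih =>
    rw [hv_append, hv_append, ih (fun j hj => h j (by simp; omega))]
    unfold hvStep
    simp only []
    rw [Int.toNat_natCast, h l.length (by simp)]

theorem castShift (m n : Nat) : ((m:Int) >>> n) = ((m >>> n : Nat) : Int) := by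
  simp [Int.natCast_shiftRight]
theorem band_shift_zero (m n : Nat) (h : m < 2 ^ n) :
    PySem.Int.band ((m : Int) >>> n) 1 = 0 := by
  rw [castShift]
  have h1 : m >>> n = 0 := by rw [Nat.shiftRight_eq_div_pow]; exact Nat.div_eq_of_lt h
  rw [h1]; decide
theorem band_shift_one (m n : Nat) (h : m < 2 ^ n) :
    PySem.Int.band (((2 ^ n + m : Nat) : Int) >>> n) 1 = 1 := by
  rw [castShift]
  have h1 : (2 ^ n + m) >>> n = 1 := by
    rw [Nat.shiftRight_eq_div_pow, Nat.add_comm, Nat.add_div_right _ (Nat.two_pow_pos n), Nat.div_eq_of_lt h]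
  rw [h1]; decide
theorem band_shift_congr (m n j : Nat) (_hm : m < 2 ^ n) (hj : j < n) :
    PySem.Int.band (((2 ^ n + m : Nat) : Int) >>> j) 1 = PySem.Int.band ((m : Int) >>> j) 1 := by
  rw [castShift, castShift]
  have e1 : (1 : Int) = ((1 : Nat) : Int) := rfl
  rw [e1, PySem.Int.band_natCast, PySem.Int.band_natCast]
  congr 1
  rw [Nat.shiftRight_eq_div_pow, Nat.shiftRight_eq_div_pow, Nat.and_one_is_mod, Nat.and_one_is_mod]
  have hp : 2 ^ n = 2 ^ j * (2 * 2 ^ (n - j - 1)) := by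
    rw [← pow_succ', ← pow_add]; congr 1; omega
  rw [hp, Nat.mul_add_div (Nat.two_pow_pos j)]
  omega


theorem A_char (l : List Int) (fv : Int) :
    PySem.Set.ofList ((List.range (2 ^ l.length)).map (fun m : Nat => hv l fv (m : Int)))
      = l.foldl
          (fun (s : PySem.Set Int) a =>
            PySem.Set.union s (PySem.Set.ofList (s.map (fun v => PySem.Int.bor v ((1 : Int) <<< a.toNat)))))
          (PySem.Set.ofList [fv]) := by
  induction l using List.reverseRecOn with
  | nil => simp [hv, PySem.List.enumerate_nil]
  | append_singleton l a ih =>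
    have hlen : (l ++ [a]).length = l.length + 1 := by simp
    have hsplit : (2 : Nat) ^ (l.length + 1) = 2 ^ l.length + 2 ^ l.length := by ring
    rw [hlen, hsplit, List.range_add, List.map_append, List.map_map]
    have h1 : ∀ m ∈ List.range (2 ^ l.length),
        hv (l ++ [a]) fv (m : Int) = hv l fv (m : Int) := by
      intro m hm
      rw [hv_append]
      unfold hvStep
      simp only [Int.toNat_natCast]
      rw [band_shift_zero m l.length (List.mem_range.mp hm)]
      simp
    have h2 : ∀ m ∈ List.range (2 ^ l.length),
        hv (l ++ [a]) fv ((2 ^ l.length + m : Nat) : Int)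
          = PySem.Int.bor (hv l fv (m : Int)) ((1 : Int) <<< a.toNat) := by
      intro m hm
      rw [hv_append]
      unfold hvStep
      simp only [Int.toNat_natCast]
      rw [band_shift_one m l.length (List.mem_range.mp hm)]
      simp only [ne_eq, one_ne_zero, not_false_eq_true, if_true]
      congr 1
      exact hv_congr l fv _ _ (fun j hj => band_shift_congr m l.length j (List.mem_range.mp hm) hj)
    rw [List.map_congr_left h1]
    simp only [Function.comp_def]
    rw [List.map_congr_left h2]
    rw [show (fun m : Nat => PySem.Int.bor (hv l fv (m : Int)) ((1 : Int) <<< a.toNat))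
          = (fun v => PySem.Int.bor v ((1 : Int) <<< a.toNat)) ∘ (fun m : Nat => hv l fv (m : Int)) from rfl,
        ← List.map_map]
    rw [PySem.Set.ofList_append, update_map_ofList, List.foldl_append]
    simp only [List.foldl_cons, List.foldl_nil]
    rw [ih]
    rw [show ∀ (s : PySem.Set Int) t, PySem.Set.union s t = PySem.Set.update s t from fun _ _ => rfl, update_ofList_right]
    simp only [Int.shiftLeft_natCast_right]

-- ===== VERDICT (by name: the statement is the Claim_ definition above) =====
set_option maxRecDepth 4096 in
theorem subcube_spec : Claim_equal_subcube := by
  unfold Claim_equal_subcube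
  intro fa base _ _
  unfold Spec_subcube subcube subcube_alt
  dsimp only
  simp only [Int.shiftRight_natCast_right, Int.shiftLeft_natCast_right]
  have hmask : ((1 : Int) <<< (6 : Nat)) - 1 = 63 := by decide
  rw [hmask]
  generalize PySem.Int.band base (PySem.Int.bxor 63 ((fa.map (fun a => @HShiftLeft.hShiftLeft Int Nat Int Int.instHShiftLeftNat 1 a.toNat)).sum)) = FV
  refine Eq.trans (PySem.List.foldl_congr_mem
        (g := fun (s : PySem.Set Int) (bits : Int) => PySem.Set.add s (hv fa FV bits))
        _ _ _ (fun acc x _ => rfl)) ?_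
  rw [← PySem.Set.update_map_eq_foldl_add]
  rw [show (PySem.Set.empty : PySem.Set Int) = ([] : PySem.Set Int) from rfl, PySem.Set.update_nil_left]
  rw [PySem.List.pyRange_one]
  have hb : (((1 : Int) <<< fa.length) - 0).toNat = 2 ^ fa.length := by
    rw [sub_zero, Int.shiftLeft_eq, one_mul, show ((2 : Int)) = ((2 : Nat) : Int) from rfl,
      ← Nat.cast_pow, Int.toNat_natCast]
  rw [hb, List.map_map]
  have hc : ((fun m : Int => hv fa FV m) ∘ fun k : Nat => (0 : Int) + (k : Int))
      = (fun m : Nat => hv fa FV (m : Int)) := by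
    funext m; simp
  rw [hc, A_char]
  refine PySem.List.foldl_congr_mem _ _ _ _ ?_
  intro acc x _
  rw [Int.shiftLeft_natCast_right]
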